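-- pv_equiv track=rewrite | github.com/root-aj000/aj | backend/src/intelligence/static_analyzer.py | _has_code_duplication
-- ===== SOURCE A (Python) =====
-- from typing import Dict, Any, List, Optional
--
-- def _has_code_duplication(content: str) -> bool:
--     """Detect potential code duplication (simplified)."""
--     lines = [l.strip() for l in content.splitlines() if l.strip() and not l.strip().startswith('#')]
--
--     if len(lines) < 10:
--         return False
--
--     # Look for repeated line patterns
--     line_counts: Dict[str, int] = {}
--
--     for line in lines:
--         if len(line) > 10:  # Ignore short lines
--             line_counts[line] = line_counts.get(line, 0) + 1
--
--     # If same line appears 3+ times, likely duplication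
--     for count in line_counts.values():
--         if count >= 3:
--             return True
--
--     return False
-- ===== SOURCE B (Python) =====
-- def _has_code_duplication(content: str) -> bool:
--     """Detect potential code duplication (simplified)."""
--     lines = [l.strip() for l in content.splitlines() if l.strip() and not l.strip().startswith('#')]
--
--     if len(lines) < 10:
--         return False
--
--     # Sort the long lines so identical lines become adjacent, then scan runs.
--     longs = sorted(l for l in lines if len(l) > 10)
--
--     prev = None
--     run = 0
--     for line in longs:
--         if line == prev:
--             run += 1
--         else:
--             prev = line
--             run = 1
--         if run >= 3:
--             return True
--     return False
-- ===== Notes on version B (the rewrite author's own statement) =====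
-- stated objective: alternative
-- what changed: Replaces A's dict-counting pass plus value scan with sorting the long lines and scanning for a run of 3 equal adjacent lines.
import Mathlib
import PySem

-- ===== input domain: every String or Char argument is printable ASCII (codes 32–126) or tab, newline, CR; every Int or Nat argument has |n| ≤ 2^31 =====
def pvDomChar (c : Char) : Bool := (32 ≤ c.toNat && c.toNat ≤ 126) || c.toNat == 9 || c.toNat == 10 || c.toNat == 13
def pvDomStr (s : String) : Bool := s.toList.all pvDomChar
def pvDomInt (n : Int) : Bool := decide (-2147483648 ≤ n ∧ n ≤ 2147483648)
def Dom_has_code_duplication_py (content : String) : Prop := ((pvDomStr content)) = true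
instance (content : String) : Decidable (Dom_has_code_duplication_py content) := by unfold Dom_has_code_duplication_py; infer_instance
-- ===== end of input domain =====

-- B replaces A's dict-counting pass with sort-then-adjacent-run scanning; objective: alternative algorithm, same observable result.

-- shared normalization (identical first line in both Pythons):
-- [l.strip() for l in content.splitlines() if l.strip() and not l.strip().startswith('#')]
def pyLines (content : String) : List String :=
  ((PySem.Str.splitlines content).filter
      (fun l => PySem.Str.len (PySem.Str.strip l) ≠ 0 &&
                !(PySem.Str.startswith (PySem.Str.strip l) "#"))).map PySem.Str.strip

-- ===== PORT A =====
def has_code_duplication_py (content : String) : Bool :=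
  let lines := pyLines content
  if lines.length < 10 then false
  else
    let line_counts : PySem.Dict String Int :=
      lines.foldl
        (fun d line =>
          if PySem.Str.len line > 10 then d.insert line (d.getD line 0 + 1) else d)
        PySem.Dict.empty
    line_counts.values.any (fun count => count ≥ 3)

-- ===== PORT B =====
def scanRuns : Option String → Nat → List String → Bool
  | _, _, [] => false
  | prev, run, line :: rest =>
    let run' := if some line = prev then run + 1 else 1
    if run' ≥ 3 then true else scanRuns (some line) run' rest

def has_code_duplication_py_alt (content : String) : Bool :=
  let lines := pyLines content
  if lines.length < 10 then false
  else
    let longs := PySem.List.sorted (lines.filter (fun l => PySem.Str.len l > 10)) (fun x => x) false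
    scanRuns none 0 longs

-- ===== PRECONDITION & SPEC =====
def Spec_has_code_duplication_py (content : String) (out : Bool) : Prop := out = has_code_duplication_py_alt content
instance (content : String) (out : Bool) : Decidable (Spec_has_code_duplication_py content out) := by unfold Spec_has_code_duplication_py; infer_instance

-- ===== CLAIM (what is proved, stated in full; the proofs are below) =====
def Claim_equal_has_code_duplication_py : Prop := ∀ (content : String), Dom_has_code_duplication_py content → Spec_has_code_duplication_py content (has_code_duplication_py content)

-- ===== LEMMAS AND PROOFS =====

lemma count_cons_self (l : String) (rest : List String) :
    (l :: rest).count l = rest.count l + 1 := by simp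

lemma count_cons_ne (l x : String) (rest : List String) (h : ¬ x = l) :
    (l :: rest).count x = rest.count x := by
  have h' : ¬ l = x := fun hc => h hc.symm
  simp [h']

-- A's conditional counting fold is the counter of the filtered list
lemma a_fold_counter (lines : List String) :
    lines.foldl
        (fun d line =>
          if PySem.Str.len line > 10 then d.insert line (d.getD line 0 + 1) else d)
        PySem.Dict.empty
      = PySem.Dict.counter (lines.filter (fun l => PySem.Str.len l > 10)) := by
  rw [← PySem.Dict.foldl_insert_getD_add_one_eq_counter]
  conv_rhs => rw [List.foldl_filter]
  simp

-- A's value scan says: some long line occurs at least 3 times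
lemma a_iff (longs : List String) :
    ((PySem.Dict.counter longs).values.any (fun count => count ≥ 3)) = true
      ↔ ∃ x, 3 ≤ longs.count x := by
  constructor
  · intro h
    rcases List.any_eq_true.mp h with ⟨c, hc, h3⟩
    have : c ∈ (PySem.Dict.counter longs).items.map (·.2) := hc
    rw [PySem.Dict.items_counter] at this
    simp only [List.map_map, List.mem_map, Function.comp] at this
    rcases this with ⟨k, _, rfl⟩
    exact ⟨k, by exact_mod_cast of_decide_eq_true h3⟩
  · rintro ⟨x, hx⟩
    apply List.any_eq_true.mpr
    have hmem : x ∈ longs := List.count_pos_iff.mp (by omega)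
    refine ⟨(longs.count x : Int), ?_, by simpa using hx⟩
    show (longs.count x : Int) ∈ (PySem.Dict.counter longs).items.map (·.2)
    rw [PySem.Dict.items_counter]
    simp only [List.map_map, List.mem_map, Function.comp]
    exact ⟨x, by simpa using hmem, rfl⟩

-- run-scan invariant on a sorted tail
lemma scan_inv (p : String) (r : Nat) (hr : r ≤ 2) (s : List String)
    (hs : s.Pairwise (· ≤ ·)) (hall : ∀ y ∈ s, p ≤ y) :
    scanRuns (some p) r s = true ↔ (3 ≤ r + s.count p ∨ ∃ x, 3 ≤ s.count x) := by
  induction s generalizing p r with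
  | nil => simp [scanRuns]; omega
  | cons l rest ih =>
    rw [List.pairwise_cons] at hs
    by_cases hlp : l = p
    · subst hlp
      simp only [scanRuns, if_true]
      by_cases h3 : r + 1 ≥ 3
      · rw [if_pos h3]
        constructor
        · intro _
          left
          have : 0 < (l :: rest).count l := List.count_pos_iff.mpr (by simp)
          omega
        · intro _; rfl
      · rw [if_neg h3, ih l (r + 1) (by omega) hs.2 hs.1]
        have hc := count_cons_self l rest
        constructor
        · rintro (h | ⟨x, hx⟩)
          · left; omega
          · by_cases hxl : x = l
            · rw [hxl] at hx; left; omega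
            · right; exact ⟨x, by rw [count_cons_ne l x rest hxl]; exact hx⟩
        · rintro (h | ⟨x, hx⟩)
          · left; omega
          · by_cases hxl : x = l
            · rw [hxl] at hx; rw [hc] at hx; left; omega
            · right; exact ⟨x, by rw [count_cons_ne l x rest hxl] at hx; exact hx⟩
    · have hpl : p < l := lt_of_le_of_ne (hall l (by simp)) (fun h => hlp h.symm)
      simp only [scanRuns, Option.some.injEq, if_neg hlp]
      rw [if_neg (by omega : ¬ (1 ≥ 3)), ih l 1 (by omega) hs.2 hs.1]
      have hrest0 : rest.count p = 0 := by
        apply List.count_eq_zero.mpr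
        intro hmem
        exact absurd (hs.1 p hmem) (not_le.mpr hpl)
      have hcl := count_cons_self l rest
      constructor
      · rintro (h | ⟨x, hx⟩)
        · right; exact ⟨l, by omega⟩
        · by_cases hxl : x = l
          · rw [hxl] at hx; right; exact ⟨l, by omega⟩
          · right; exact ⟨x, by rw [count_cons_ne l x rest hxl]; exact hx⟩
      · rintro (h | ⟨x, hx⟩)
        · rw [count_cons_ne l p rest (fun h => hlp h.symm), hrest0] at h; omega
        · by_cases hxl : x = l
          · rw [hxl] at hx; rw [hcl] at hx; left; omega
          · right; exact ⟨x, by rw [count_cons_ne l x rest hxl] at hx; exact hx⟩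

-- B's run scan over a sorted list detects a triple occurrence
lemma b_iff (s : List String) (hs : s.Pairwise (· ≤ ·)) :
    scanRuns none 0 s = true ↔ ∃ x, 3 ≤ s.count x := by
  cases s with
  | nil => simp [scanRuns]
  | cons l rest =>
    rw [List.pairwise_cons] at hs
    simp only [scanRuns, reduceCtorEq, if_false]
    rw [if_neg (by omega : ¬ (1 ≥ 3)), scan_inv l 1 (by omega) rest hs.2 hs.1]
    have hcl := count_cons_self l rest
    constructor
    · rintro (h | ⟨x, hx⟩)
      · exact ⟨l, by omega⟩
      · by_cases hxl : x = l
        · rw [hxl] at hx; exact ⟨l, by omega⟩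
        · exact ⟨x, by rw [count_cons_ne l x rest hxl]; exact hx⟩
    · rintro ⟨x, hx⟩
      by_cases hxl : x = l
      · rw [hxl] at hx; left; omega
      · right; exact ⟨x, by rw [count_cons_ne l x rest hxl] at hx; exact hx⟩

-- ===== VERDICT (by name: the statement is the Claim_ definition above) =====
theorem has_code_duplication_py_spec : Claim_equal_has_code_duplication_py := by
  intro content _
  show has_code_duplication_py content = has_code_duplication_py_alt content
  unfold has_code_duplication_py has_code_duplication_py_alt
  by_cases hlen : (pyLines content).length < 10
  · simp [hlen]
  · simp only [if_neg hlen]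
    have hperm := PySem.List.sorted_perm
      ((pyLines content).filter (fun l => PySem.Str.len l > 10)) (fun x => x) false
    have hsp : (PySem.List.sorted
        ((pyLines content).filter (fun l => PySem.Str.len l > 10)) (fun x => x) false).Pairwise (· ≤ ·) := by
      simpa using PySem.List.sorted_pairwise
        ((pyLines content).filter (fun l => PySem.Str.len l > 10)) (fun x => x)
    rw [a_fold_counter, Bool.eq_iff_iff, a_iff, b_iff _ hsp]
    constructor
    · rintro ⟨x, hx⟩; exact ⟨x, by rw [hperm.count_eq]; exact hx⟩
    · rintro ⟨x, hx⟩; exact ⟨x, by rw [← hperm.count_eq]; exact hx⟩
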